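-- pv_equiv track=rewrite | github.com/florianvazelle/sturdy-octo-adventure | Assets/Script/entoforms.py | to_bitlist
-- ===== SOURCE A (Python) =====
-- bn = 8     # bit number - on va coder chaque information génétique sur bn bits
--
-- def to_bitlist(number: int):
--     # Le premier bit est réservé au signe
--     out = [0 if number >= 0 else 1]
--     bits = "{0:b}".format(abs(number))
--     # Si trop de bits
--     if len(bits) > (bn - 1):
--         # On prend seulement les bn dernier bit
--         bits = bits[len(bits) - (bn - 1):]
--     # Si pas assez de bits
--     for _ in range((bn - 1) - len(bits)):
--         # On ajoute des zéro
--         out.append(0)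
--     for bit in bits:
--         out.append(int(bit))
--     return out
-- ===== SOURCE B (Python) =====
-- def to_bitlist(number: int):
--     out = [0 if number >= 0 else 1]
--     m = abs(number)
--     for i in range(6, -1, -1):
--         out.append((m >> i) & 1)
--     return out
-- ===== Notes on version B (the rewrite author's own statement) =====
-- stated objective: idiomatic
-- what changed: Replaces binary string formatting, slicing, zero-padding loop and per-character int() conversion by direct bit extraction: shift-and-mask abs(number) at each of the seven magnitude bit positions, high to low.
import Mathlib
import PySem

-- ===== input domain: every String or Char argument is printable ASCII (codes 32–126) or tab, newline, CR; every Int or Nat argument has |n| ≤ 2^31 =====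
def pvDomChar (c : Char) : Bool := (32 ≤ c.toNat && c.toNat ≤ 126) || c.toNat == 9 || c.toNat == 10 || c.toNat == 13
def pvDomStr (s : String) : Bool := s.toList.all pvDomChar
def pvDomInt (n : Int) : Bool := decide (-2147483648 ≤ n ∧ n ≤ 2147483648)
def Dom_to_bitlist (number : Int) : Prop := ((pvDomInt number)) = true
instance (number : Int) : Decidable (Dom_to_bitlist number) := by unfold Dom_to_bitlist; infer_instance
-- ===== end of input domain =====

-- B replaces A's binary-string formatting, slicing, zero-padding loop and per-character
-- int() conversion by direct shift-and-mask extraction of the seven magnitude bits, high to low; objective: idiomatic.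

-- ===== PORT A =====
-- "{0:b}".format(n): the binary representation, MSB first, represented as its list of
-- digit values (each 0 or 1); exact digit-for-digit image of the Python format string.
def binGo (n : Nat) : List Int :=
  if _h : n = 0 then [] else binGo (n / 2) ++ [((n % 2 : Nat) : Int)]
termination_by n
decreasing_by exact Nat.div_lt_self (Nat.pos_of_ne_zero _h) (by omega)

def pyBinFmt (n : Nat) : List Int := if n = 0 then [0] else binGo n

def to_bitlist (number : Int) : List Int :=
  -- out = [0 if number >= 0 else 1]
  let out : List Int := [if number ≥ 0 then 0 else 1]
  -- bits = "{0:b}".format(abs(number))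
  let bits := pyBinFmt number.natAbs
  -- if len(bits) > (bn - 1): bits = bits[len(bits) - (bn - 1):]
  let bits := if bits.length > 8 - 1 then bits.drop (bits.length - (8 - 1)) else bits
  -- for _ in range((bn - 1) - len(bits)): out.append(0)
  let out := (PySem.List.pyRange 0 ((8 - 1 : Int) - (bits.length : Int)) 1).foldl
    (fun acc _ => acc ++ [(0 : Int)]) out
  -- for bit in bits: out.append(int(bit))  (digits already carried as ints)
  bits.foldl (fun acc bit => acc ++ [bit]) out

-- ===== PORT B =====
def to_bitlist_alt (number : Int) : List Int :=
  let out : List Int := [if number ≥ 0 then 0 else 1]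
  let m := number.natAbs
  -- for i in range(6, -1, -1): out.append((m >> i) & 1)
  (PySem.List.pyRange 6 (-1) (-1)).foldl
    (fun acc i => acc ++ [(((m >>> i.toNat) &&& 1 : Nat) : Int)]) out

-- ===== PRECONDITION & SPEC =====
def Spec_to_bitlist (number : Int) (out : List Int) : Prop := out = to_bitlist_alt number
instance (number : Int) (out : List Int) : Decidable (Spec_to_bitlist number out) := by unfold Spec_to_bitlist; infer_instance

-- ===== CLAIM (what is proved, stated in full; the proofs are below) =====
def Claim_equal_to_bitlist : Prop := ∀ (number : Int), Dom_to_bitlist number → Spec_to_bitlist number (to_bitlist number)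

-- ===== LEMMAS AND PROOFS =====

-- last-k digits of xs, zero-padded on the left to length exactly k (A's truncate+pad step)
def padTrunc (k : Nat) (xs : List Int) : List Int :=
  if xs.length > k then xs.drop (xs.length - k) else List.replicate (k - xs.length) 0 ++ xs

-- the low k bits of m, MSB first
def bitsOf : Nat → Nat → List Int
  | 0, _ => []
  | k + 1, m => bitsOf k (m / 2) ++ [((m % 2 : Nat) : Int)]

theorem foldl_snoc_map {α β : Type} (f : α → β) :
    ∀ (l : List α) (init : List β),
      l.foldl (fun acc i => acc ++ [f i]) init = init ++ l.map f := by
  intro l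
  induction l with
  | nil => intro init; simp
  | cons x xs ih => intro init; simp [List.foldl_cons, ih]

theorem foldl_const_zero {α : Type} :
    ∀ (l : List α) (init : List Int),
      l.foldl (fun acc _ => acc ++ [(0 : Int)]) init = init ++ List.replicate l.length 0 := by
  intro l
  induction l with
  | nil => intro init; simp
  | cons x xs ih =>
      intro init
      simp [List.foldl_cons, ih, List.replicate_succ]

theorem padTrunc_zero (xs : List Int) : padTrunc 0 xs = [] := by
  unfold padTrunc
  split_ifs with h
  · simp
  · have : xs.length = 0 := by omega
    simp [List.eq_nil_of_length_eq_zero this]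

theorem padTrunc_snoc (k : Nat) (xs : List Int) (d : Int) :
    padTrunc (k + 1) (xs ++ [d]) = padTrunc k xs ++ [d] := by
  unfold padTrunc
  rcases Nat.lt_or_ge k xs.length with h | h
  · rw [if_pos (by simp only [List.length_append, List.length_cons, List.length_nil]; omega), if_pos h]
    have hx : xs.length + 1 - (k + 1) = xs.length - k := by omega
    simp only [List.length_append, List.length_cons, List.length_nil, hx]
    rw [List.drop_append_of_le_length (by omega : xs.length - k ≤ xs.length)]
  · rw [if_neg (by simp only [List.length_append, List.length_cons, List.length_nil]; omega), if_neg (by omega)]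
    have hx : k + 1 - (xs ++ [d]).length = k - xs.length := by simp only [List.length_append, List.length_cons, List.length_nil]; omega
    rw [hx, List.append_assoc]

theorem binGo_ne (m : Nat) (h : m ≠ 0) :
    binGo m = binGo (m / 2) ++ [((m % 2 : Nat) : Int)] := by
  rw [binGo]; simp [h]

theorem padTrunc_binGo : ∀ (k m : Nat), padTrunc k (binGo m) = bitsOf k m := by
  intro k
  induction k with
  | zero => intro m; simp [padTrunc_zero, bitsOf]
  | succ k ih =>
      intro m
      by_cases h : m = 0
      · subst h
        have h0 : binGo 0 = [] := by rw [binGo]; simp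
        have hk : bitsOf k 0 = List.replicate k 0 := by
          have := ih 0
          rw [h0] at this
          rw [← this]; unfold padTrunc; simp
        show padTrunc (k + 1) (binGo 0) = bitsOf (k + 1) 0
        rw [h0]
        unfold padTrunc
        simp [bitsOf, hk, List.replicate_succ' (n := k)]
      · rw [binGo_ne m h, padTrunc_snoc, ih]
        rfl

theorem padTrunc_pyBinFmt (m : Nat) : padTrunc 7 (pyBinFmt m) = bitsOf 7 m := by
  by_cases h : m = 0
  · subst h
    have h0 : binGo 0 = [] := by rw [binGo]; simp
    rw [← padTrunc_binGo 7 0, h0]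
    unfold pyBinFmt padTrunc
    norm_num
    decide
  · rw [← padTrunc_binGo 7 m]
    unfold pyBinFmt
    simp [h]

theorem bitsOf_seven (m : Nat) :
    bitsOf 7 m = [((m / 64 % 2 : Nat) : Int), ((m / 32 % 2 : Nat) : Int),
      ((m / 16 % 2 : Nat) : Int), ((m / 8 % 2 : Nat) : Int), ((m / 4 % 2 : Nat) : Int),
      ((m / 2 % 2 : Nat) : Int), ((m % 2 : Nat) : Int)] := by
  simp [bitsOf, Nat.div_div_eq_div_mul]

-- A's tail equals padTrunc 7 of the format string (stated over the zeta-expanded body)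
theorem tailA_eq (s : Int) (bs : List Int) :
    (if bs.length > 8 - 1 then bs.drop (bs.length - (8 - 1)) else bs).foldl
        (fun acc bit => acc ++ [bit])
        ((PySem.List.pyRange 0
            ((8 - 1 : Int) -
              (((if bs.length > 8 - 1 then bs.drop (bs.length - (8 - 1)) else bs).length : Nat) : Int)) 1).foldl
          (fun acc _ => acc ++ [(0 : Int)]) [s])
      = s :: padTrunc 7 bs := by
  unfold padTrunc
  by_cases h : bs.length > 8 - 1
  · rw [if_pos h, if_pos (show bs.length > 7 from h)]
    have hlen : (bs.drop (bs.length - (8 - 1))).length = 7 := by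
      simp only [List.length_drop]; omega
    rw [foldl_const_zero, foldl_snoc_map (f := fun b : Int => b), hlen]
    rw [show ((8 - 1 : Int) - ((7 : Nat) : Int)) = 0 by norm_num]
    rw [PySem.List.pyRange_one_eq_nil (by norm_num)]
    simp
  · rw [if_neg h, if_neg (show ¬ bs.length > 7 from h)]
    rw [foldl_const_zero, foldl_snoc_map (f := fun b : Int => b)]
    have hlr : (PySem.List.pyRange 0 ((8 - 1 : Int) - (bs.length : Int)) 1).length
        = 7 - bs.length := by
      rw [PySem.List.length_pyRange_one]; omega
    rw [hlr]
    simp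

theorem to_bitlist_eq (number : Int) :
    to_bitlist number =
      (if number ≥ 0 then (0 : Int) else 1) :: padTrunc 7 (pyBinFmt number.natAbs) := by
  exact tailA_eq (if number ≥ 0 then (0 : Int) else 1) (pyBinFmt number.natAbs)

-- B's tail equals bitsOf 7
theorem pyRange_countdown :
    PySem.List.pyRange 6 (-1) (-1) = [6, 5, 4, 3, 2, 1, 0] := by
  rw [PySem.List.pyRange_neg_one_cons (by norm_num), PySem.List.pyRange_neg_one_cons (by norm_num),
      PySem.List.pyRange_neg_one_cons (by norm_num), PySem.List.pyRange_neg_one_cons (by norm_num),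
      PySem.List.pyRange_neg_one_cons (by norm_num), PySem.List.pyRange_neg_one_cons (by norm_num),
      PySem.List.pyRange_neg_one_cons (by norm_num), PySem.List.pyRange_neg_one_eq_nil (by norm_num)]
  norm_num

theorem tailB_eq (s : Int) (m : Nat) :
    (PySem.List.pyRange 6 (-1) (-1)).foldl
        (fun acc i => acc ++ [(((m >>> i.toNat) &&& 1 : Nat) : Int)]) [s]
      = s :: bitsOf 7 m := by
  rw [pyRange_countdown,
    foldl_snoc_map (f := fun i : Int => (((m >>> i.toNat) &&& 1 : Nat) : Int))]
  rw [bitsOf_seven]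
  simp [Nat.shiftRight_eq_div_pow, Nat.and_one_is_mod]

theorem to_bitlist_alt_eq (number : Int) :
    to_bitlist_alt number =
      (if number ≥ 0 then (0 : Int) else 1) :: bitsOf 7 number.natAbs := by
  exact tailB_eq (if number ≥ 0 then (0 : Int) else 1) number.natAbs

-- ===== VERDICT (by name: the statement is the Claim_ definition above) =====
theorem to_bitlist_spec : Claim_equal_to_bitlist := by
  intro number _
  show to_bitlist number = to_bitlist_alt number
  rw [to_bitlist_eq, to_bitlist_alt_eq, padTrunc_pyBinFmt]
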